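-- pv_equiv track=rewrite | github.com/RienkHeins/BigDataComputing | Assignment1/Assignment1.py | calculate_quals
-- ===== SOURCE A (Python) =====
-- def calculate_quals(quals):
--     """
--     Calculates quality scores
--     :param quals: list of fastq quality score lines
--     :return: quality scores
--     """
--     results = []
--     for qual in quals:
--         for i, char in enumerate(qual):
--             try:
--                 results[i] += ord(char) - 33
--             except IndexError:
--                 results.append(ord(char) - 33)
--     return results
-- ===== SOURCE B (Python) =====
-- def calculate_quals(quals):
--     """Column-major re-implementation: one pass per position over all lines."""
--     width = max(map(len, quals), default=0)
--     return [sum(ord(q[j]) - 33 for q in quals if j < len(q))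
--             for j in range(width)]
-- ===== Notes on version B (the rewrite author's own statement) =====
-- stated objective: alternative
-- what changed: Replaces A's row-major loop growing a results list via try/IndexError with a column-major pass: compute the maximum line width once, then for each position j sum ord(q[j])-33 over the lines long enough to reach j.
import Mathlib
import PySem

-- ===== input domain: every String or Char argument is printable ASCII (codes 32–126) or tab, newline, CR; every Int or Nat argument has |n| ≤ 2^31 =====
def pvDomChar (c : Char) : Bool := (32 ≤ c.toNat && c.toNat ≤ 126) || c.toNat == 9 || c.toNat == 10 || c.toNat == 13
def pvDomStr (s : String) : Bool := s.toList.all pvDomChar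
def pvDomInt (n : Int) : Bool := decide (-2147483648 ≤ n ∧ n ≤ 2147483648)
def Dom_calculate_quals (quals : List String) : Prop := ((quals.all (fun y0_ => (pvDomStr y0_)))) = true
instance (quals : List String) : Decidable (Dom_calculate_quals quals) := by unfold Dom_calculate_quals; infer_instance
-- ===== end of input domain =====

-- B recomputes the per-position sums column-major (max width once, then one sum per
-- position) instead of A's row-major growing-list accumulation; objective: alternative.


-- ===== PORT A =====
-- inner loop body: `try: results[i] += ord(char)-33  except IndexError: results.append(...)`
def pvInner (results : List Int) (ic : Int × Char) : List Int :=
  match PySem.List.pyGet? results ic.1 with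
  | some x => PySem.List.pySetD results ic.1 (x + (((ic.2.toNat : Int)) - 33))
  | none => results ++ [((ic.2.toNat : Int) - 33)]

def calculate_quals (quals : List String) : List Int :=
  quals.foldl (fun results qual => (PySem.List.enumerate qual.toList).foldl pvInner results) []

-- ===== PORT B =====
-- width = max(map(len, quals), default=0)
def pvWidth (quals : List String) : Nat :=
  (quals.map (fun q => q.toList.length)).foldl max 0

-- sum(ord(q[j]) - 33 for q in quals if j < len(q))
def pvColSum (quals : List String) (j : Nat) : Int :=
  quals.foldl (fun acc q =>
    if j < q.toList.length then acc + (((q.toList.getD j ' ').toNat : Int) - 33) else acc) 0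

def calculate_quals_alt (quals : List String) : List Int :=
  (List.range (pvWidth quals)).map (pvColSum quals)

-- ===== PRECONDITION & SPEC =====
def Spec_calculate_quals (quals : List String) (out : List Int) : Prop := out = calculate_quals_alt quals
instance (quals : List String) (out : List Int) : Decidable (Spec_calculate_quals quals out) := by unfold Spec_calculate_quals; infer_instance

-- ===== CLAIM (what is proved, stated in full; the proofs are below) =====
def Claim_equal_calculate_quals : Prop := ∀ (quals : List String), Dom_calculate_quals quals → Spec_calculate_quals quals (calculate_quals quals)

-- ===== LEMMAS AND PROOFS =====

-- simple recursive description of A's inner loop on one line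
def pvCombine : List Int → List Char → List Int
  | r, [] => r
  | x :: r, c :: s => (x + ((c.toNat : Int) - 33)) :: pvCombine r s
  | [], c :: s => ((c.toNat : Int) - 33) :: pvCombine [] s

theorem pvInner_eq_aux : ∀ (s : List Char) (pre r : List Int),
    (PySem.List.enumerate s (pre.length : Int)).foldl pvInner (pre ++ r) = pre ++ pvCombine r s := by
  intro s
  induction s with
  | nil => intro pre r; simp [PySem.List.enumerate, pvCombine]
  | cons c s ih =>
    intro pre r
    rw [PySem.List.enumerate_cons]
    cases r with
    | nil =>
      have hstep : pvInner (pre ++ ([] : List Int)) ((pre.length : Int), c)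
          = pre ++ [((c.toNat : Int) - 33)] := by
        simp [pvInner]
      have := ih (pre ++ [((c.toNat : Int) - 33)]) []
      simp only [List.foldl_cons, hstep]
      simpa [pvCombine, List.append_assoc] using this
    | cons x r =>
      have hget : PySem.List.pyGet? (pre ++ x :: r) ((pre.length : Nat) : Int) = some x := by
        simp
      have hstep : pvInner (pre ++ x :: r) ((pre.length : Int), c)
          = pre ++ (x + ((c.toNat : Int) - 33)) :: r := by
        simp only [pvInner, hget, PySem.List.pySetD_natCast]
        rw [List.set_append]
        simp
      have := ih (pre ++ [x + ((c.toNat : Int) - 33)]) r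
      simp only [List.foldl_cons, hstep]
      simpa [pvCombine, List.append_assoc] using this

theorem pvInner_eq (s : List Char) (r : List Int) :
    (PySem.List.enumerate s).foldl pvInner r = pvCombine r s := by
  simpa using pvInner_eq_aux s [] r

theorem pvCombine_length : ∀ (s : List Char) (r : List Int),
    (pvCombine r s).length = max r.length s.length := by
  intro s
  induction s with
  | nil => intro r; simp [pvCombine]
  | cons c s ih =>
    intro r
    cases r with
    | nil => simp [pvCombine, ih]
    | cons x r => simp [pvCombine, ih]

theorem pvCombine_getD : ∀ (s : List Char) (r : List Int) (j : Nat),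
    (pvCombine r s).getD j 0
      = r.getD j 0 + (if j < s.length then ((s.getD j ' ').toNat : Int) - 33 else 0) := by
  intro s
  induction s with
  | nil => intro r j; simp [pvCombine]
  | cons c s ih =>
    intro r j
    cases r with
    | nil =>
      cases j with
      | zero => simp [pvCombine]
      | succ j => simpa [pvCombine, Nat.succ_lt_succ_iff] using ih [] j
    | cons x r =>
      cases j with
      | zero => simp [pvCombine]
      | succ j => simpa [pvCombine, Nat.succ_lt_succ_iff] using ih r j

theorem pvFoldlMax : ∀ (l : List Nat) (a : Nat), l.foldl max a = max a (l.foldl max 0) := by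
  intro l
  induction l with
  | nil => intro a; simp
  | cons b l ih => intro a; simp only [List.foldl_cons]; rw [ih (max a b), ih (max 0 b)]; omega

theorem pvWidth_cons (q : String) (ls : List String) :
    pvWidth (q :: ls) = max q.toList.length (pvWidth ls) := by
  simp only [pvWidth, List.map_cons, List.foldl_cons]
  rw [pvFoldlMax]
  omega

theorem pvColSumAcc : ∀ (ls : List String) (j : Nat) (a : Int),
    ls.foldl (fun acc q =>
      if j < q.toList.length then acc + (((q.toList.getD j ' ').toNat : Int) - 33) else acc) a
    = a + pvColSum ls j := by
  intro ls
  induction ls with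
  | nil => intro j a; simp [pvColSum]
  | cons q ls ih =>
    intro j a
    simp only [List.foldl_cons, pvColSum]
    rw [ih, ih]
    split_ifs <;> ring

theorem pvColSum_cons (q : String) (ls : List String) (j : Nat) :
    pvColSum (q :: ls) j
      = (if j < q.toList.length then ((q.toList.getD j ' ').toNat : Int) - 33 else 0)
        + pvColSum ls j := by
  conv_lhs => simp only [pvColSum, List.foldl_cons]
  rw [pvColSumAcc]
  split_ifs <;> ring

theorem pvRangeMapGetD (r : List Int) : (List.range r.length).map (fun j => r.getD j 0) = r := by
  apply List.ext_getElem
  · simp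
  · intro i h1 h2
    simp [List.getD_eq_getElem?_getD, List.getElem?_eq_getElem h2]

theorem pvFoldlCombine : ∀ (ls : List String) (r : List Int),
    ls.foldl (fun r q => pvCombine r q.toList) r
      = (List.range (max r.length (pvWidth ls))).map (fun j => r.getD j 0 + pvColSum ls j) := by
  intro ls
  induction ls with
  | nil =>
    intro r
    simp only [List.foldl_nil, pvWidth, List.map_nil, pvColSum, Nat.max_zero, add_zero]
    exact (pvRangeMapGetD r).symm
  | cons q ls ih =>
    intro r
    simp only [List.foldl_cons]
    rw [ih]
    have hlen : max (pvCombine r q.toList).length (pvWidth ls)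
        = max r.length (pvWidth (q :: ls)) := by
      rw [pvCombine_length, pvWidth_cons]; omega
    rw [hlen]
    apply List.map_congr_left
    intro j _
    rw [pvCombine_getD, pvColSum_cons]
    ring

-- ===== VERDICT (by name: the statement is the Claim_ definition above) =====
theorem calculate_quals_spec : Claim_equal_calculate_quals := by
  intro quals _
  unfold Spec_calculate_quals calculate_quals calculate_quals_alt
  have h1 : quals.foldl (fun results qual => (PySem.List.enumerate qual.toList).foldl pvInner results) []
      = quals.foldl (fun r q => pvCombine r q.toList) [] := by
    have hf : (fun (results : List Int) (qual : String) =>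
        (PySem.List.enumerate qual.toList).foldl pvInner results)
        = fun r q => pvCombine r q.toList := by
      funext r q
      exact pvInner_eq q.toList r
    rw [hf]
  rw [h1, pvFoldlCombine]
  simp
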